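-- pv_equiv track=rewrite | github.com/Odhiambo-20/Biometric-Key-Derivation1 | embedding_android_beard_bch.py | _minimal_poly
-- ===== SOURCE A (Python) =====
-- def _gf256_mul(a: int, b: int, prim: int = 0x11D) -> int:
--     """Multiply two GF(2^8) elements. Primitive poly: x^8+x^4+x^3+x^2+1 = 0x11D."""
--     result = 0
--     while b:
--         if b & 1:
--             result ^= a
--         a <<= 1
--         if a & 0x100:
--             a ^= prim
--         b >>= 1
--     return result
--
-- def _gf256_pow(base: int, exp: int) -> int:
--     """base^exp in GF(2^8)."""
--     result = 1
--     for _ in range(exp):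
--         result = _gf256_mul(result, base)
--     return result
--
-- def _conjugacy_class(exp: int) -> list:
--     """2-cyclotomic coset of exp modulo 255."""
--     seen = []
--     e = exp % 255
--     while e not in seen:
--         seen.append(e)
--         e = (e * 2) % 255
--     return seen
--
-- def _minimal_poly(root_exp: int) -> list:
--     """
--     Minimal polynomial of alpha^root_exp over GF(2),
--     where alpha = 2 is the primitive element of GF(2^8).
--     """
--     alpha    = 2
--     conj     = _conjugacy_class(root_exp)
--     poly     = [1]
--     for e in conj:
--         rv       = _gf256_pow(alpha, e)
--         new_poly = [0] * (len(poly) + 1)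
--         for i, c in enumerate(poly):
--             new_poly[i]   ^= c
--             new_poly[i+1] ^= _gf256_mul(c, rv)
--         poly = new_poly
--     return [int(c & 1) for c in poly]
-- ===== SOURCE B (Python) =====
-- def _minimal_poly(root_exp: int) -> list:
--     """
--     Minimal polynomial of alpha^root_exp over GF(2), alpha = 2 primitive in GF(2^8).
--     Table-driven: log/antilog tables replace the per-root pow loop and every
--     shift-and-xor field multiply with O(1) lookups.
--     """
--     # Precompute antilog (powers of alpha) and log tables once, prim = 0x11D.
--     exp_t = [0] * 255
--     log_t = [0] * 256
--     x = 1
--     for i in range(255):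
--         exp_t[i] = x
--         log_t[x] = i
--         x <<= 1
--         if x & 0x100:
--             x ^= 0x11D
--     # 2-cyclotomic coset of root_exp mod 255: the doubling map is a permutation
--     # of Z/255, so the orbit is a pure cycle; walk it until it returns to start.
--     start = root_exp % 255
--     conj = [start]
--     e = (start * 2) % 255
--     while e != start:
--         conj.append(e)
--         e = (e * 2) % 255
--     # Product of (x - alpha^e): each step multiplies by a linear factor, done as
--     # an aligned-zip comprehension in the log domain (log(alpha^e) = e).
--     poly = [1]
--     for e in conj:
--         poly = [a ^ (0 if b == 0 else exp_t[(log_t[b] + e) % 255])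
--                 for a, b in zip(poly + [0], [0] + poly)]
--     return [c & 1 for c in poly]
-- ===== Notes on version B (the rewrite author's own statement) =====
-- stated objective: faster
-- what changed: B precomputes GF(256) log/antilog tables once, reads alpha^e and every field product via O(1) table lookups instead of A's per-root shift-and-xor pow/mul loops, walks the 2-cyclotomic coset as a pure cycle (no membership scan), and builds each new polynomial as a zip of the shifted/unshifted coefficient lists instead of index-mutating a zero array.
import Mathlib
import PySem

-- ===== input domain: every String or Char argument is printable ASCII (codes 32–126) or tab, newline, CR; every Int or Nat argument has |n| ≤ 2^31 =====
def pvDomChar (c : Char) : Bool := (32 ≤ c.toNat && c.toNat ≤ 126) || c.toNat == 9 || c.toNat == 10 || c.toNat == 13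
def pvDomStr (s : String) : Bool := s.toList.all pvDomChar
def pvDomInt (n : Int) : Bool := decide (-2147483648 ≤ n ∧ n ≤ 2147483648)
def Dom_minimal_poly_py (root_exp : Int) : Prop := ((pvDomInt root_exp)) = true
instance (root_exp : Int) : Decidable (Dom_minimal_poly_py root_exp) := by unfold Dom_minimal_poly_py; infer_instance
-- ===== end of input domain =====

-- B replaces A's per-root shift-and-xor power/multiply loops by precomputed GF(256)
-- log/antilog tables and a zip comprehension for the linear-factor product (objective: faster).

-- ===== PORT A =====

-- _gf256_mul: the while-loop on b; all values are nonnegative Python ints, modelled as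
-- Nat. The fuel argument only makes the recursion total (structural, so the kernel can
-- evaluate it): b halves each step, so fuel = b never runs out.
def pvGfMulF : Nat → Nat → Nat → Nat → Nat
  | 0, _, _, result => result
  | fuel + 1, a, b, result =>
      if b = 0 then result
      else
        let result' := if b &&& 1 ≠ 0 then result ^^^ a else result
        let a' := a <<< 1
        let a'' := if a' &&& 0x100 ≠ 0 then a' ^^^ 0x11D else a'
        pvGfMulF fuel a'' (b >>> 1) result'

def pvGfMul (a b result : Nat) : Nat := pvGfMulF b a b result

-- _gf256_pow: result = 1; for _ in range(exp): result = _gf256_mul(result, base)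
def pvGfPow (base exp : Nat) : Nat :=
  (List.range exp).foldl (fun r _ => pvGfMul r base 0) 1

-- _conjugacy_class while-loop; fuel 256 only makes the recursion total: each step
-- appends a new element < 255 to seen, so the loop ends before fuel runs out.
def pvConjLoop : Nat → List Nat → Nat → List Nat
  | 0, seen, _ => seen
  | fuel + 1, seen, e =>
      if e ∈ seen then seen
      else pvConjLoop fuel (seen ++ [e]) ((e * 2) % 255)

-- body of _minimal_poly after e = root_exp % 255 (computed in _conjugacy_class)
def pvCoreA (r : Nat) : List Int :=
  let conj := pvConjLoop 256 [] r
  let poly := conj.foldl (fun poly e =>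
    let rv := pvGfPow 2 e
    let newp := List.replicate (poly.length + 1) 0
    poly.zipIdx.foldl (fun np ci =>
      let np' := np.set ci.2 (np.getD ci.2 0 ^^^ ci.1)
      np'.set (ci.2 + 1) (np'.getD (ci.2 + 1) 0 ^^^ pvGfMul ci.1 rv 0)) newp) [1]
  poly.map (fun c => (Int.ofNat (c &&& 1) : Int))

def minimal_poly_py (root_exp : Int) : List Int :=
  pvCoreA ((PySem.Int.mod root_exp 255).toNat)

-- ===== PORT B =====

-- precompute antilog/log tables (the for-i-in-range(255) loop of Source B)
def pvTables : List Nat × List Nat :=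
  let t := (List.range 255).foldl (fun (s : List Nat × List Nat × Nat) i =>
    let et := s.1.set i s.2.2
    let lt := s.2.1.set s.2.2 i
    let x' := s.2.2 <<< 1
    let x'' := if x' &&& 0x100 ≠ 0 then x' ^^^ 0x11D else x'
    (et, lt, x'')) (List.replicate 255 0, List.replicate 256 0, 1)
  (t.1, t.2.1)

-- Source B's while e != start loop; fuel 256 only makes it total (the doubling orbit
-- in Z/255 returns to start within 255 steps).
def pvCosetLoop (start : Nat) : Nat → Nat → List Nat
  | 0, _ => []
  | fuel + 1, e =>
      if e = start then []
      else e :: pvCosetLoop start fuel ((e * 2) % 255)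

def pvCoreB (start : Nat) : List Int :=
  let et := pvTables.1
  let lt := pvTables.2
  let conj := start :: pvCosetLoop start 256 ((start * 2) % 255)
  let poly := conj.foldl (fun poly e =>
    List.zipWith (fun a b =>
      a ^^^ (if b = 0 then 0 else et.getD ((lt.getD b 0 + e) % 255) 0))
      (poly ++ [0]) (0 :: poly)) [1]
  poly.map (fun c => (Int.ofNat (c &&& 1) : Int))

def minimal_poly_py_alt (root_exp : Int) : List Int :=
  pvCoreB ((PySem.Int.mod root_exp 255).toNat)

-- ===== PRECONDITION & SPEC =====
def Spec_minimal_poly_py (root_exp : Int) (out : List Int) : Prop := out = minimal_poly_py_alt root_exp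
instance (root_exp : Int) (out : List Int) : Decidable (Spec_minimal_poly_py root_exp out) := by unfold Spec_minimal_poly_py; infer_instance

-- ===== CLAIM (what is proved, stated in full; the proofs are below) =====
def Claim_equal_minimal_poly_py : Prop := ∀ (root_exp : Int), Dom_minimal_poly_py root_exp → Spec_minimal_poly_py root_exp (minimal_poly_py root_exp)

-- ===== LEMMAS AND PROOFS =====

-- the two cores agree on every residue mod 255
set_option maxRecDepth 100000 in
set_option maxHeartbeats 4000000 in
theorem pvCore_eq : ∀ r : Fin 255, pvCoreA r.val = pvCoreB r.val := by decide

-- ===== VERDICT (by name: the statement is the Claim_ definition above) =====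
theorem minimal_poly_py_spec : Claim_equal_minimal_poly_py := by
  intro root_exp _
  show minimal_poly_py root_exp = minimal_poly_py_alt root_exp
  have h0 : (0:Int) ≤ PySem.Int.mod root_exp 255 := PySem.Int.mod_nonneg root_exp (by norm_num)
  have h1 : PySem.Int.mod root_exp 255 < 255 := PySem.Int.mod_lt root_exp (by norm_num)
  have h : (PySem.Int.mod root_exp 255).toNat < 255 := by omega
  exact pvCore_eq ⟨(PySem.Int.mod root_exp 255).toNat, h⟩
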